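-- pv_equiv track=rewrite | github.com/brenoASantana/uerj | maratona_18_semana_ime/tresArvores.py | maior_retangulo_sem_arvores
-- ===== SOURCE A (Python) =====
-- def maior_retangulo_sem_arvores(x1, y1, x2, y2, arvores):
--     """
--     Retorna a maior área de um retângulo [a, b] × [c, d] dentro de [x1, x2] × [y1, y2]
--     que NÃO contenha nenhuma das três árvores.
--     """
--     # Coleta todas as coordenadas x e y relevantes (bordas + árvores)
--     xs = sorted(set([x1, x2] + [ax for ax, ay in arvores]))
--     ys = sorted(set([y1, y2] + [ay for ax, ay in arvores]))
--
--     max_area = 0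
--
--     # Testa todos os pares de intervalos [xs[i], xs[j]] × [ys[k], ys[l]]
--     for i in range(len(xs)):
--         for j in range(i, len(xs)):
--             a, b = xs[i], xs[j]
--             for k in range(len(ys)):
--                 for l in range(k, len(ys)):
--                     c, d = ys[k], ys[l]
--                     # Verifica se o retângulo [a, b] × [c, d] NÃO contém nenhuma árvore
--                     contem_alguma = False
--                     for ax, ay in arvores:
--                         if a <= ax <= b and c <= ay <= d:
--                             contem_alguma = True
--                             break
--                     if not contem_alguma:
--                         area = (b - a) * (d - c)
--                         if area > max_area:
--                             max_area = area
--
--     return max_area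
-- ===== SOURCE B (Python) =====
-- def maior_retangulo_sem_arvores(x1, y1, x2, y2, arvores):
--     xs = sorted(set([x1, x2] + [ax for ax, ay in arvores]))
--     ys = sorted(set([y1, y2] + [ay for ax, ay in arvores]))
--     best = 0
--     for i, a in enumerate(xs):
--         for b in xs[i:]:
--             w = b - a
--             # y-values blocked in this x-strip
--             sy = {ay for ax, ay in arvores if a <= ax <= b}
--             # one left-to-right pass over ys: widest unblocked run gives the
--             # best y-extent for this strip (replaces the two inner index loops
--             # and the per-rectangle tree scan of the original)
--             start = None
--             for y in ys:
--                 if y in sy: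
--                     start = None
--                 else:
--                     if start is None:
--                         start = y
--                     area = w * (y - start)
--                     if area > best:
--                         best = area
--     return best
-- ===== Notes on version B (the rewrite author's own statement) =====
-- stated objective: faster
-- what changed: Per x-strip, B precomputes the set of blocked y-values once and replaces A's two inner y-index loops plus the per-rectangle scan over all trees by a single left-to-right run scan over the sorted candidate y-values (the widest unblocked run gives the best y-extent), dropping the complexity from O(n^5) to O(n^3).
import Mathlib
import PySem

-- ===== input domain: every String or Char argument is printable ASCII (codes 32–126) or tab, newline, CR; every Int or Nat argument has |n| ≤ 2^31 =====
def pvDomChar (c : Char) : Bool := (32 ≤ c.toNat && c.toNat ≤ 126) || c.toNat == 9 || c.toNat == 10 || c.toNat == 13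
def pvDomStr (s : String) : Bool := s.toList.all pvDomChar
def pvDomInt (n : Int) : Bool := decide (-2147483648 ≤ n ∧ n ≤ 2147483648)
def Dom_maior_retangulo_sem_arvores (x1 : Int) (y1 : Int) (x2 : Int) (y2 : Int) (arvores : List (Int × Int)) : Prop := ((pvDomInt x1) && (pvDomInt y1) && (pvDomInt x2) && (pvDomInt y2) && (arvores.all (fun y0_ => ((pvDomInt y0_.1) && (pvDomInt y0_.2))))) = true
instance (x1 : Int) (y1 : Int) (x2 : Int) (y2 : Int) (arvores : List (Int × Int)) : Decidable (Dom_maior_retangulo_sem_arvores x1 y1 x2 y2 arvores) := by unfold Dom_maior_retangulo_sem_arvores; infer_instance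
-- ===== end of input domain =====

-- B replaces A's two inner y-index loops and per-rectangle tree scan by one run scan
-- over the sorted candidate y-values per x-strip (objective: faster, O(n^5) → O(n^3)).

-- ===== PORT A =====
def maior_retangulo_sem_arvores (x1 : Int) (y1 : Int) (x2 : Int) (y2 : Int) (arvores : List (Int × Int)) : Int :=
  let xs := PySem.List.sorted (PySem.Set.ofList ([x1, x2] ++ arvores.map (fun t => t.1))) (fun v => v) false
  let ys := PySem.List.sorted (PySem.Set.ofList ([y1, y2] ++ arvores.map (fun t => t.2))) (fun v => v) false
  (PySem.List.pyRange 0 (xs.length : Int) 1).foldl (fun best i =>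
    (PySem.List.pyRange i (xs.length : Int) 1).foldl (fun best j =>
      let a := PySem.List.pyGetD xs i 0
      let b := PySem.List.pyGetD xs j 0
      (PySem.List.pyRange 0 (ys.length : Int) 1).foldl (fun best k =>
        (PySem.List.pyRange k (ys.length : Int) 1).foldl (fun best l =>
          let c := PySem.List.pyGetD ys k 0
          let d := PySem.List.pyGetD ys l 0
          -- break-loop over arvores setting a flag ≡ List.any
          let contem := arvores.any (fun t =>
            decide (a ≤ t.1) && decide (t.1 ≤ b) && decide (c ≤ t.2) && decide (t.2 ≤ d))
          if contem then best
          else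
            let area := (b - a) * (d - c)
            if area > best then area else best) best) best) best) 0

-- ===== PORT B =====
def maior_retangulo_sem_arvores_alt (x1 : Int) (y1 : Int) (x2 : Int) (y2 : Int) (arvores : List (Int × Int)) : Int :=
  let xs := PySem.List.sorted (PySem.Set.ofList ([x1, x2] ++ arvores.map (fun t => t.1))) (fun v => v) false
  let ys := PySem.List.sorted (PySem.Set.ofList ([y1, y2] ++ arvores.map (fun t => t.2))) (fun v => v) false
  (PySem.List.enumerate xs 0).foldl (fun best p =>
    (PySem.List.slice xs (some p.1) none).foldl (fun best b =>
      let a := p.2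
      let w := b - a
      -- y-values blocked in this x-strip
      let sy : PySem.Set Int := PySem.Set.ofList
        ((arvores.filter (fun t => decide (a ≤ t.1) && decide (t.1 ≤ b))).map (fun t => t.2))
      -- single pass over ys: state = (best, start of current unblocked run)
      (ys.foldl (fun (st : Int × Option Int) y =>
        if PySem.Set.contains sy y then (st.1, none)
        else
          let s := st.2.getD y
          let area := w * (y - s)
          ((if area > st.1 then area else st.1), some s)) (best, (none : Option Int))).1) best) 0

-- ===== PRECONDITION & SPEC =====
def Spec_maior_retangulo_sem_arvores (x1 : Int) (y1 : Int) (x2 : Int) (y2 : Int) (arvores : List (Int × Int)) (out : Int) : Prop := out = maior_retangulo_sem_arvores_alt x1 y1 x2 y2 arvores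
instance (x1 : Int) (y1 : Int) (x2 : Int) (y2 : Int) (arvores : List (Int × Int)) (out : Int) : Decidable (Spec_maior_retangulo_sem_arvores x1 y1 x2 y2 arvores out) := by unfold Spec_maior_retangulo_sem_arvores; infer_instance

-- ===== CLAIM (what is proved, stated in full; the proofs are below) =====
def Claim_equal_maior_retangulo_sem_arvores : Prop := ∀ (x1 : Int) (y1 : Int) (x2 : Int) (y2 : Int) (arvores : List (Int × Int)), Dom_maior_retangulo_sem_arvores x1 y1 x2 y2 arvores → Spec_maior_retangulo_sem_arvores x1 y1 x2 y2 arvores (maior_retangulo_sem_arvores x1 y1 x2 y2 arvores)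

-- ===== LEMMAS AND PROOFS =====

def runScan (w : Int) (blocked : Int → Bool) : Int → Option Int → List Int → Int
  | best, _, [] => best
  | best, start, y :: t =>
      if blocked y then runScan w blocked best none t
      else
        let s := start.getD y
        runScan w blocked (if w * (y - s) > best then w * (y - s) else best) (some s) t

theorem scan_bridge (w : Int) (blocked : Int → Bool) :
    ∀ (l : List Int) (best : Int) (start : Option Int),
      (l.foldl (fun (st : Int × Option Int) y =>
        if blocked y then (st.1, none)
        else
          let s := st.2.getD y
          ((if w * (y - s) > st.1 then w * (y - s) else st.1), some s)) (best, start)).1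
      = runScan w blocked best start l := by
  intro l
  induction l with
  | nil => intro best start; simp [runScan]
  | cons y t ih =>
      intro best start
      simp only [List.foldl_cons, runScan]
      by_cases h : blocked y <;> simp [h, ih]

theorem runScan_ge_init (w : Int) (blocked : Int → Bool) :
    ∀ (l : List Int) (best : Int) (start : Option Int), best ≤ runScan w blocked best start l := by
  intro l
  induction l with
  | nil => intro best start; simp [runScan]
  | cons y t ih =>
      intro best start
      simp only [runScan]
      by_cases h : blocked y
      · simp [h, ih]
      · simp only [h, Bool.false_eq_true, if_false]
        refine le_trans ?_ (ih _ _)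
        split <;> omega

theorem runScan_ge_d (w : Int) (blocked : Int → Bool) :
    ∀ (l : List Int), l.Pairwise (· < ·) →
      ∀ (best : Int) (s0 : Int) (d : Int), d ∈ l →
      (∀ y ∈ l, y ≤ d → blocked y = false) →
      w * (d - s0) ≤ runScan w blocked best (some s0) l := by
  intro l
  induction l with
  | nil => intro _ _ _ _ hd; simp at hd
  | cons y t ih =>
      intro hl best s0 d hd hub
      have hpw := (List.pairwise_cons.mp hl).1
      have htl := (List.pairwise_cons.mp hl).2
      rcases List.mem_cons.mp hd with hy | hdt
      · subst hy
        have hby : blocked d = false := hub d (List.mem_cons_self) le_rfl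
        simp only [runScan, hby, Bool.false_eq_true, if_false, Option.getD_some]
        refine le_trans ?_ (runScan_ge_init w blocked t _ _)
        split <;> omega
      · have hyd : y < d := hpw d hdt
        have hby : blocked y = false := hub y List.mem_cons_self (le_of_lt hyd)
        simp only [runScan, hby, Bool.false_eq_true, if_false, Option.getD_some]
        exact ih htl _ s0 d hdt (fun z hz => hub z (List.mem_cons_of_mem _ hz))

theorem runScan_ge_pair (w : Int) (hw : 0 ≤ w) (blocked : Int → Bool) :
    ∀ (l : List Int), l.Pairwise (· < ·) →
      ∀ (best : Int) (start : Option Int),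
      (∀ s0, start = some s0 → ∀ y ∈ l, s0 ≤ y) →
      ∀ c d, c ∈ l → d ∈ l → c ≤ d →
      (∀ y ∈ l, c ≤ y → y ≤ d → blocked y = false) →
      w * (d - c) ≤ runScan w blocked best start l := by
  intro l
  induction l with
  | nil => intro _ _ _ _ c d hc; simp at hc
  | cons y t ih =>
      intro hl best start hstart c d hc hd hcd hub
      have hpw := (List.pairwise_cons.mp hl).1
      have htl := (List.pairwise_cons.mp hl).2
      rcases List.mem_cons.mp hc with hcy | hct
      · -- c = y : head of list
        subst hcy
        have hbc : blocked c = false := hub c List.mem_cons_self le_rfl hcd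
        simp only [runScan, hbc, Bool.false_eq_true, if_false]
        -- s = start.getD c ≤ c
        have hs : start.getD c ≤ c := by
          cases start with
          | none => simp
          | some s0 => simpa using hstart s0 rfl c List.mem_cons_self
        rcases List.mem_cons.mp hd with hdy | hdt
        · -- d = c : area 0
          subst hdy
          have hnn : 0 ≤ w * (d - start.getD d) := mul_nonneg hw (by omega)
          have hz : w * (d - d) = 0 := by ring
          refine le_trans ?_ (runScan_ge_init w blocked t _ _)
          rw [hz]; split <;> omega
        · -- d in tail: use ge_d with s = start.getD c
          have h1 : w * (d - start.getD c) ≤ runScan w blocked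
              (if w * (c - start.getD c) > best then w * (c - start.getD c) else best)
              (some (start.getD c)) t := by
            refine runScan_ge_d w blocked t htl _ _ d hdt ?_
            intro z hz hzd
            exact hub z (List.mem_cons_of_mem _ hz) (le_of_lt (hpw z hz)) hzd
          have h2 : w * (d - c) ≤ w * (d - start.getD c) :=
            mul_le_mul_of_nonneg_left (by omega) hw
          omega
      · -- c in tail; d too (since y < c ≤ d)
        have hyc : y < c := hpw c hct
        have hdt : d ∈ t := by
          rcases List.mem_cons.mp hd with hdy | h
          · exact absurd hcd (by omega)
          · exact h
        have hub' : ∀ z ∈ t, c ≤ z → z ≤ d → blocked z = false :=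
          fun z hz => hub z (List.mem_cons_of_mem _ hz)
        simp only [runScan]
        by_cases hb : blocked y
        · simp only [hb, if_true]
          exact ih htl _ none (by simp) c d hct hdt hcd hub'
        · simp only [hb, Bool.false_eq_true, if_false]
          refine ih htl _ (some (start.getD y)) ?_ c d hct hdt hcd hub'
          intro s0 hs0 z hz
          cases start with
          | none =>
              simp at hs0; subst hs0
              exact le_of_lt (hpw z hz)
          | some s1 =>
              simp at hs0; subst hs0
              exact le_trans (hstart s1 rfl y List.mem_cons_self) (le_of_lt (hpw z hz))

theorem runScan_le (w : Int) (blocked : Int → Bool) (M : Int) :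
    ∀ (l : List Int), l.Pairwise (· < ·) →
      ∀ (best : Int) (start : Option Int), best ≤ M → 0 ≤ M →
      (∀ s0, start = some s0 → ∀ d ∈ l, (∀ y ∈ l, y ≤ d → blocked y = false) → w * (d - s0) ≤ M) →
      (∀ c d, c ∈ l → d ∈ l → c ≤ d →
        (∀ y ∈ l, c ≤ y → y ≤ d → blocked y = false) → w * (d - c) ≤ M) →
      runScan w blocked best start l ≤ M := by
  intro l
  induction l with
  | nil => intro _ best start hb _ _ _; simpa [runScan] using hb
  | cons y t ih =>
      intro hl best start hb hM hs hp
      have hpw := (List.pairwise_cons.mp hl).1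
      have htl := (List.pairwise_cons.mp hl).2
      simp only [runScan]
      by_cases hby : blocked y
      · simp only [hby, if_true]
        refine ih htl best none hb hM (by simp) ?_
        intro c d hc hd hcd hub
        refine hp c d (List.mem_cons_of_mem _ hc) (List.mem_cons_of_mem _ hd) hcd ?_
        intro z hz hcz hzd
        rcases List.mem_cons.mp hz with hzy | hzt
        · -- z = y : but y < c ≤ z, contradiction
          exact absurd hcz (by have := hpw c hc; omega)
        · exact hub z hzt hcz hzd
      · simp only [hby, Bool.false_eq_true, if_false]
        -- new best ≤ M
        have hyM : w * (y - start.getD y) ≤ M := by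
          cases start with
          | none => simpa using hM
          | some s0 =>
              refine hs s0 rfl y List.mem_cons_self ?_
              intro z hz hzy
              rcases List.mem_cons.mp hz with h | hzt
              · subst h; simpa using hby
              · exact absurd hzy (by have := hpw z hzt; omega)
        have hb' : (if w * (y - start.getD y) > best then w * (y - start.getD y) else best) ≤ M := by
          split <;> omega
        refine ih htl _ (some (start.getD y)) hb' hM ?_ ?_
        · -- carried start
          intro s0 hs0 d hd hub
          have hubl : ∀ z ∈ y :: t, z ≤ d → blocked z = false := by
            intro z hz hzd
            rcases List.mem_cons.mp hz with h | hzt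
            · subst h; simpa using hby
            · exact hub z hzt hzd
          cases start with
          | none =>
              -- s0 = y : pair (y, d)
              simp at hs0; subst hs0
              refine hp y d List.mem_cons_self (List.mem_cons_of_mem _ hd)
                (le_of_lt (hpw d hd)) ?_
              intro z hz _ hzd; exact hubl z hz hzd
          | some s1 =>
              simp at hs0; subst hs0
              exact hs s1 rfl d (List.mem_cons_of_mem _ hd) hubl
        · -- pairs within t
          intro c d hc hd hcd hub
          refine hp c d (List.mem_cons_of_mem _ hc) (List.mem_cons_of_mem _ hd) hcd ?_
          intro z hz hcz hzd
          rcases List.mem_cons.mp hz with h | hzt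
          · subst h; simpa using hby
          · exact hub z hzt hcz hzd

def pairFold (g : Int → Int → Int → Int) : Int → List Int → Int
  | best, [] => best
  | best, a :: t => pairFold g ((a :: t).foldl (fun b x => g b a x) best) t

def pairStep (w : Int) (bad : Int → Int → Bool) (best c d : Int) : Int :=
  if bad c d then best else if w * (d - c) > best then w * (d - c) else best

theorem foldl_ge_init (f : Int → Int → Int) (hf : ∀ acc x, acc ≤ f acc x) :
    ∀ (L : List Int) (best : Int), best ≤ L.foldl f best := by
  intro L
  induction L with
  | nil => simp
  | cons x t ih => intro best; exact le_trans (hf best x) (ih _)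

theorem foldl_hit (f : Int → Int → Int) (hf : ∀ acc x, acc ≤ f acc x) (v : Int) (d : Int)
    (hd : ∀ acc, v ≤ f acc d) :
    ∀ (L : List Int) (best : Int), d ∈ L → v ≤ L.foldl f best := by
  intro L
  induction L with
  | nil => intro _ h; simp at h
  | cons x t ih =>
      intro best hmem
      rcases List.mem_cons.mp hmem with h | h
      · subst h; exact le_trans (hd best) (foldl_ge_init f hf t _)
      · exact ih _ h

theorem foldl_le (f : Int → Int → Int) (M : Int) :
    ∀ (L : List Int) (best : Int), best ≤ M → (∀ acc x, x ∈ L → acc ≤ M → f acc x ≤ M) →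
      L.foldl f best ≤ M := by
  intro L
  induction L with
  | nil => intro best hb _; simpa using hb
  | cons x t ih =>
      intro best hb hstep
      exact ih _ (hstep best x List.mem_cons_self hb)
        (fun acc z hz => hstep acc z (List.mem_cons_of_mem _ hz))

theorem pairFold_ge_init (g : Int → Int → Int → Int) (hg : ∀ best a b, best ≤ g best a b) :
    ∀ (l : List Int) (best : Int), best ≤ pairFold g best l := by
  intro l
  induction l with
  | nil => intro best; simp [pairFold]
  | cons a t ih =>
      intro best
      simp only [pairFold]
      exact le_trans (foldl_ge_init _ (fun acc x => hg acc a x) _ best) (ih _)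

theorem pairFold_ge_pair (w : Int) (bad : Int → Int → Bool) :
    ∀ (l : List Int), l.Pairwise (· < ·) →
      ∀ (best : Int) (c d : Int), c ∈ l → d ∈ l → c ≤ d → bad c d = false →
      w * (d - c) ≤ pairFold (pairStep w bad) best l := by
  intro l
  induction l with
  | nil => intro _ _ _ _ hc; simp at hc
  | cons a t ih =>
      intro hl best c d hc hd hcd hbad
      have hpw := (List.pairwise_cons.mp hl).1
      have htl := (List.pairwise_cons.mp hl).2
      have hstep : ∀ acc x y, acc ≤ pairStep w bad acc x y := by
        intro acc x y; unfold pairStep; split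
        · exact le_rfl
        · split <;> omega
      rcases List.mem_cons.mp hc with h | hct
      · -- c = a : the inner fold hits d
        subst h
        simp only [pairFold]
        refine le_trans (foldl_hit (fun b x => pairStep w bad b c x)
          (fun acc x => hstep acc c x) (w * (d - c)) d ?_ (c :: t) best hd)
          (pairFold_ge_init _ hstep _ _)
        intro acc
        simp only [pairStep, hbad, Bool.false_eq_true, if_false]
        split <;> omega
      · simp only [pairFold]
        exact ih htl _ c d hct (by
          rcases List.mem_cons.mp hd with h | h
          · exact absurd hcd (by have := hpw c hct; omega)
          · exact h) hcd hbad

theorem pairFold_le (w : Int) (bad : Int → Int → Bool) (M : Int) :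
    ∀ (l : List Int), l.Pairwise (· ≤ ·) →
      ∀ (best : Int), best ≤ M →
      (∀ c d, c ∈ l → d ∈ l → c ≤ d → bad c d = false → w * (d - c) ≤ M) →
      pairFold (pairStep w bad) best l ≤ M := by
  intro l
  induction l with
  | nil => intro _ best hb _; simpa [pairFold] using hb
  | cons a t ih =>
      intro hl best hb hp
      have hpw := (List.pairwise_cons.mp hl).1
      have htl := (List.pairwise_cons.mp hl).2
      simp only [pairFold]
      refine ih htl _ ?_ (fun c d hc hd hcd hbad =>
        hp c d (List.mem_cons_of_mem _ hc) (List.mem_cons_of_mem _ hd) hcd hbad)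
      refine foldl_le _ M _ best hb ?_
      intro acc x hx hacc
      have hax : a ≤ x := by
        rcases List.mem_cons.mp hx with h | h
        · omega
        · exact hpw x h
      by_cases hbx : bad a x
      · simp [pairStep, hbx, hacc]
      · have := hp a x List.mem_cons_self hx hax (by simpa using hbx)
        simp only [pairStep, hbx, Bool.false_eq_true, if_false]
        split <;> omega

theorem inner_eq (w : Int) (hw : 0 ≤ w) (blocked : Int → Bool) (bad : Int → Int → Bool)
    (l : List Int) (hl : l.Pairwise (· < ·))
    (hbad : ∀ c d, c ∈ l → d ∈ l →
      (bad c d = false ↔ ∀ y ∈ l, c ≤ y → y ≤ d → blocked y = false))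
    (best : Int) (hb : 0 ≤ best) :
    pairFold (pairStep w bad) best l = runScan w blocked best none l := by
  have hstep : ∀ acc x y, acc ≤ pairStep w bad acc x y := by
    intro acc x y; unfold pairStep; split
    · exact le_rfl
    · split <;> omega
  apply le_antisymm
  · refine pairFold_le w bad _ l (hl.imp (fun h => le_of_lt h)) best
      (runScan_ge_init w blocked l best none) ?_
    intro c d hc hd hcd hbd
    exact runScan_ge_pair w hw blocked l hl best none (by simp) c d hc hd hcd
      ((hbad c d hc hd).mp hbd)
  · refine runScan_le w blocked _ l hl best none
      (pairFold_ge_init _ hstep l best)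
      (le_trans hb (pairFold_ge_init _ hstep l best)) (by simp) ?_
    intro c d hc hd hcd hub
    exact pairFold_ge_pair w bad l hl best c d hc hd hcd ((hbad c d hc hd).mpr hub)

theorem foldl_congr_nonneg (f g : Int → Int → Int) (a : Int)
    (hmono : ∀ acc x, acc ≤ f acc x) :
    ∀ (L : List Int) (best : Int), 0 ≤ best →
      (∀ acc x, 0 ≤ acc → x ∈ L → f acc x = g acc x) →
      L.foldl f best = L.foldl g best := by
  intro L
  induction L with
  | nil => intro _ _ _; rfl
  | cons x t ih =>
      intro best hb h
      simp only [List.foldl_cons]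
      rw [← h best x hb List.mem_cons_self]
      exact ih _ (le_trans hb (hmono best x)) (fun acc z hz hzz => h acc z hz (List.mem_cons_of_mem _ hzz))

theorem pairFold_congr (g1 g2 : Int → Int → Int → Int)
    (hg1 : ∀ best a b, best ≤ g1 best a b) :
    ∀ (l : List Int), l.Pairwise (· ≤ ·) →
      ∀ (best : Int), 0 ≤ best →
      (∀ best a b, 0 ≤ best → a ∈ l → b ∈ l → a ≤ b → g1 best a b = g2 best a b) →
      pairFold g1 best l = pairFold g2 best l := by
  intro l
  induction l with
  | nil => intro _ _ _ _; rfl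
  | cons a t ih =>
      intro hl best hb h
      have hpw := (List.pairwise_cons.mp hl).1
      have htl := (List.pairwise_cons.mp hl).2
      simp only [pairFold]
      have hax : ∀ x ∈ a :: t, a ≤ x := by
        intro x hx
        rcases List.mem_cons.mp hx with hxa | hxt
        · omega
        · exact hpw x hxt
      have hinner : (a :: t).foldl (fun b x => g1 b a x) best
          = (a :: t).foldl (fun b x => g2 b a x) best := by
        refine foldl_congr_nonneg _ _ a (fun acc x => hg1 acc a x) (a :: t) best hb ?_
        intro acc x hacc hx
        exact h acc a x hacc List.mem_cons_self hx (hax x hx)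
      have hb1 : 0 ≤ (a :: t).foldl (fun b x => g1 b a x) best :=
        le_trans hb (foldl_ge_init _ (fun acc x => hg1 acc a x) _ best)
      rw [← hinner]
      exact ih htl _ hb1 (fun best' x y hb' hx hy =>
        h best' x y hb' (List.mem_cons_of_mem _ hx) (List.mem_cons_of_mem _ hy))

theorem pairs_bridge (xs : List Int) (g : Int → Int → Int → Int) :
    ∀ (i : Nat) (best : Int),
      (PySem.List.pyRange (i : Int) (xs.length : Int) 1).foldl
        (fun best i' => (PySem.List.pyRange i' (xs.length : Int) 1).foldl
          (fun b j => g b (PySem.List.pyGetD xs i' 0) (PySem.List.pyGetD xs j 0)) best) best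
      = pairFold g best (xs.drop i) := by
  intro i
  induction hn : xs.length - i using Nat.strong_induction_on generalizing i with
  | _ n ih =>
      intro best
      by_cases hlt : i < xs.length
      · rw [PySem.List.pyRange_one_cons (by exact_mod_cast hlt)]
        simp only [List.foldl_cons]
        have hget : PySem.List.pyGetD xs (i : Int) 0 = xs[i] := by
          rw [PySem.List.pyGetD_natCast]; exact List.getD_eq_getElem xs 0 hlt
        have hinner : (PySem.List.pyRange (i : Int) (xs.length : Int) 1).foldl
            (fun b j => g b (PySem.List.pyGetD xs (i : Int) 0) (PySem.List.pyGetD xs j 0)) best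
            = (xs.drop i).foldl (fun b x => g b xs[i] x) best := by
          rw [hget]
          exact_mod_cast PySem.List.foldl_pyRange_pyGetD (a := (i : Int)) (xs := xs) (d := 0)
            (f := fun b x => g b xs[i] x) (init := best) (by positivity)
        rw [hinner]
        have hdrop : xs.drop i = xs[i] :: xs.drop (i+1) := List.drop_eq_getElem_cons hlt
        have hcast : ((i : Int) + 1) = (((i+1 : Nat)) : Int) := by push_cast; ring
        subst hn
        rw [hcast, ih (xs.length - (i+1)) (by omega) (i+1) rfl]
        conv_rhs => rw [hdrop]
        simp only [pairFold]
        rw [← hdrop]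
      · rw [PySem.List.pyRange_one_eq_nil (by exact_mod_cast Nat.le_of_not_lt hlt)]
        rw [List.drop_eq_nil_of_le (Nat.le_of_not_lt hlt)]
        rfl

theorem enum_bridge (xs : List Int) (g : Int → Int → Int → Int) :
    ∀ (i : Nat) (best : Int),
      (PySem.List.enumerate (xs.drop i) (i : Int)).foldl
        (fun best p => (PySem.List.slice xs (some p.1) none).foldl
          (fun b x => g b p.2 x) best) best
      = pairFold g best (xs.drop i) := by
  intro i
  induction hn : xs.length - i using Nat.strong_induction_on generalizing i with
  | _ n ih =>
      intro best
      by_cases hlt : i < xs.length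
      · have hdrop : xs.drop i = xs[i] :: xs.drop (i+1) := List.drop_eq_getElem_cons hlt
        rw [hdrop, PySem.List.enumerate_cons]
        simp only [List.foldl_cons]
        have hslice : PySem.List.slice xs (some (i : Int)) none = xs.drop i :=
          PySem.List.slice_from_natCast xs i
        have hcast : ((i : Int) + 1) = (((i+1 : Nat)) : Int) := by push_cast; ring
        rw [hslice, hdrop]
        subst hn
        rw [hcast, ih (xs.length - (i+1)) (by omega) (i+1) rfl]
        simp only [pairFold]
      · rw [List.drop_eq_nil_of_le (Nat.le_of_not_lt hlt)]
        rfl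

-- ===== assembly =====
def badA (arvores : List (Int × Int)) (a b : Int) (c d : Int) : Bool :=
  arvores.any (fun t => decide (a ≤ t.1) && decide (t.1 ≤ b) && decide (c ≤ t.2) && decide (t.2 ≤ d))

def gA (arvores : List (Int × Int)) (ys : List Int) (best a b : Int) : Int :=
  (PySem.List.pyRange 0 (ys.length : Int) 1).foldl (fun best k =>
    (PySem.List.pyRange k (ys.length : Int) 1).foldl (fun best l =>
      pairStep (b - a) (badA arvores a b) best (PySem.List.pyGetD ys k 0) (PySem.List.pyGetD ys l 0)) best) best

def blockedB (arvores : List (Int × Int)) (a b : Int) (y : Int) : Bool :=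
  PySem.Set.contains (PySem.Set.ofList
    ((arvores.filter (fun t => decide (a ≤ t.1) && decide (t.1 ≤ b))).map (fun t => t.2))) y

def gB (arvores : List (Int × Int)) (ys : List Int) (best a b : Int) : Int :=
  (ys.foldl (fun (st : Int × Option Int) y =>
    if blockedB arvores a b y then (st.1, none)
    else
      let s := st.2.getD y
      ((if (b - a) * (y - s) > st.1 then (b - a) * (y - s) else st.1), some s)) (best, (none : Option Int))).1

theorem hA_bridge (x1 y1 x2 y2 : Int) (arvores : List (Int × Int)) :
    maior_retangulo_sem_arvores x1 y1 x2 y2 arvores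
    = pairFold (gA arvores (PySem.List.sorted (PySem.Set.ofList ([y1, y2] ++ arvores.map (fun t => t.2))) (fun v => v) false)) 0
        (PySem.List.sorted (PySem.Set.ofList ([x1, x2] ++ arvores.map (fun t => t.1))) (fun v => v) false) := by
  have h := pairs_bridge
    (PySem.List.sorted (PySem.Set.ofList ([x1, x2] ++ arvores.map (fun t => t.1))) (fun v => v) false)
    (gA arvores (PySem.List.sorted (PySem.Set.ofList ([y1, y2] ++ arvores.map (fun t => t.2))) (fun v => v) false)) 0 0
  rw [List.drop_zero] at h
  exact h

theorem hB_bridge (x1 y1 x2 y2 : Int) (arvores : List (Int × Int)) :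
    maior_retangulo_sem_arvores_alt x1 y1 x2 y2 arvores
    = pairFold (gB arvores (PySem.List.sorted (PySem.Set.ofList ([y1, y2] ++ arvores.map (fun t => t.2))) (fun v => v) false)) 0
        (PySem.List.sorted (PySem.Set.ofList ([x1, x2] ++ arvores.map (fun t => t.1))) (fun v => v) false) := by
  have h := enum_bridge
    (PySem.List.sorted (PySem.Set.ofList ([x1, x2] ++ arvores.map (fun t => t.1))) (fun v => v) false)
    (gB arvores (PySem.List.sorted (PySem.Set.ofList ([y1, y2] ++ arvores.map (fun t => t.2))) (fun v => v) false)) 0 0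
  rw [List.drop_zero] at h
  exact h

theorem gB_eq_runScan (arvores : List (Int × Int)) (ys : List Int) (best a b : Int) :
    gB arvores ys best a b = runScan (b - a) (blockedB arvores a b) best none ys := by
  exact scan_bridge (b - a) (blockedB arvores a b) ys best none

theorem pairStep_ge (w : Int) (bad : Int → Int → Bool) :
    ∀ (acc x y : Int), acc ≤ pairStep w bad acc x y := by
  intro acc x y; unfold pairStep; split
  · exact le_rfl
  · split <;> omega

theorem blockedB_iff (arvores : List (Int × Int)) (a b y : Int) :
    blockedB arvores a b y = true ↔ ∃ t ∈ arvores, a ≤ t.1 ∧ t.1 ≤ b ∧ t.2 = y := by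
  unfold blockedB
  rw [show ∀ (s : PySem.Set Int) (x : Int), PySem.Set.contains s x = s.contains x from fun _ _ => rfl]
  simp [PySem.Set.mem_ofList, List.mem_map, List.mem_filter]

theorem badA_iff (arvores : List (Int × Int)) (a b c d : Int) :
    badA arvores a b c d = true ↔ ∃ t ∈ arvores, a ≤ t.1 ∧ t.1 ≤ b ∧ c ≤ t.2 ∧ t.2 ≤ d := by
  simp [badA]
  tauto

theorem hbad_main (arvores : List (Int × Int)) (ysrc : List Int)
    (hmem : ∀ t ∈ arvores, t.2 ∈ ysrc) (a b c d : Int) :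
    badA arvores a b c d = false ↔
      ∀ y ∈ ysrc, c ≤ y → y ≤ d → blockedB arvores a b y = false := by
  constructor
  · intro h y hy hcy hyd
    by_contra hb
    have hb' : blockedB arvores a b y = true := by
      revert hb; cases blockedB arvores a b y <;> simp
    obtain ⟨t, ht, h1, h2, h3⟩ := (blockedB_iff arvores a b y).mp hb'
    have : badA arvores a b c d = true :=
      (badA_iff arvores a b c d).mpr ⟨t, ht, h1, h2, by omega, by omega⟩
    rw [h] at this; exact Bool.false_ne_true this
  · intro h
    by_contra hb
    have hb' : badA arvores a b c d = true := by
      revert hb; cases badA arvores a b c d <;> simp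
    obtain ⟨t, ht, h1, h2, h3, h4⟩ := (badA_iff arvores a b c d).mp hb'
    have hbl := h t.2 (hmem t ht) h3 h4
    rw [(blockedB_iff arvores a b t.2).mpr ⟨t, ht, h1, h2, rfl⟩] at hbl
    exact absurd hbl (by simp)

theorem gA_eq (arvores : List (Int × Int)) (ysL : List Int) (best a b : Int) :
    gA arvores ysL best a b = pairFold (pairStep (b - a) (badA arvores a b)) best ysL := by
  have h := pairs_bridge ysL (pairStep (b - a) (badA arvores a b)) 0 best
  rw [List.drop_zero] at h
  exact h

theorem mem_ys (y1 y2 : Int) (arvores : List (Int × Int)) :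
    ∀ t ∈ arvores, t.2 ∈ PySem.List.sorted
      (PySem.Set.ofList ([y1, y2] ++ arvores.map (fun t => t.2))) (fun v => v) false := by
  intro t ht
  rw [PySem.List.mem_sorted, PySem.Set.mem_ofList]
  simp only [List.mem_append, List.mem_map]
  exact Or.inr ⟨t, ht, rfl⟩

theorem main_eq (x1 y1 x2 y2 : Int) (arvores : List (Int × Int)) :
    maior_retangulo_sem_arvores x1 y1 x2 y2 arvores
    = maior_retangulo_sem_arvores_alt x1 y1 x2 y2 arvores := by
  rw [hA_bridge, hB_bridge]
  have hxs := PySem.List.sorted_ofList_pairwise_lt (xs := [x1, x2] ++ arvores.map (fun t => t.1))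
  have hys := PySem.List.sorted_ofList_pairwise_lt (xs := [y1, y2] ++ arvores.map (fun t => t.2))
  refine pairFold_congr _ _ ?_ _ (hxs.imp (fun h => le_of_lt h)) 0 le_rfl ?_
  · intro best a b
    rw [gA_eq]
    exact pairFold_ge_init _ (pairStep_ge _ _) _ _
  · intro best a b hb _ _ hab
    rw [gA_eq, gB_eq_runScan]
    exact inner_eq (b - a) (by omega) (blockedB arvores a b) (badA arvores a b) _ hys
      (fun c d _ _ => hbad_main arvores _ (mem_ys y1 y2 arvores) a b c d) best hb

-- ===== VERDICT (by name: the statement is the Claim_ definition above) =====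
theorem maior_retangulo_sem_arvores_spec : Claim_equal_maior_retangulo_sem_arvores := by
  intro x1 y1 x2 y2 arvores _
  unfold Spec_maior_retangulo_sem_arvores
  exact main_eq x1 y1 x2 y2 arvores
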